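-- pv_equiv track=rewrite | github.com/smirgol/plugin.video.crunchyroll | resources/lib/router.py | get_matching_routes_from_mode
-- ===== SOURCE A (Python) =====
-- PARAMETER_ROUTE_MODE: str = "__parameter"
--
-- routes: dict = {
--     "/menu/{mode}": PARAMETER_ROUTE_MODE,
--     "/menu/{mode}/offset/{offset}": PARAMETER_ROUTE_MODE,
--     "/menu/{mode}/{genre}": PARAMETER_ROUTE_MODE,
--     "/menu/{mode}/{genre}/offset/{offset}": PARAMETER_ROUTE_MODE,
--     "/menu/{mode}/{genre}/category/{category_filter}": PARAMETER_ROUTE_MODE,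
--     "/menu/{mode}/{genre}/category/{category_filter}/offset/{offset}": PARAMETER_ROUTE_MODE,
--     "/menu/{mode}/{genre}/season/{season_filter}": PARAMETER_ROUTE_MODE,
--     "/menu/{mode}/{genre}/season/{season_filter}/offset/{offset}": PARAMETER_ROUTE_MODE,
--     "/series/{series_id}": "series",
--     "/series/{series_id}/{collection_id}": "episodes",
--     "/series/{series_id}/{collection_id}/offset/{offset}": "episodes",
--     "/video/{series_id}/{episode_id}/{stream_id}": "videoplay"
-- }
--
-- def get_matching_routes_from_mode(searching_mode: str) -> list:
--     # TODO: Cache it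
--     routes_by_mode = {}
--     for pattern, mode in routes.items():
--         if not routes_by_mode.get(mode):
--             routes_by_mode[mode] = []
--         routes_by_mode.get(mode).append(pattern)
--
--     if not routes_by_mode.get(searching_mode):
--         return routes_by_mode.get(PARAMETER_ROUTE_MODE)
--
--     return routes_by_mode.get(searching_mode)
-- ===== SOURCE B (Python) =====
-- PARAMETER_ROUTE_MODE: str = "__parameter"
--
-- routes: dict = {
--     "/menu/{mode}": PARAMETER_ROUTE_MODE,
--     "/menu/{mode}/offset/{offset}": PARAMETER_ROUTE_MODE,
--     "/menu/{mode}/{genre}": PARAMETER_ROUTE_MODE,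
--     "/menu/{mode}/{genre}/offset/{offset}": PARAMETER_ROUTE_MODE,
--     "/menu/{mode}/{genre}/category/{category_filter}": PARAMETER_ROUTE_MODE,
--     "/menu/{mode}/{genre}/category/{category_filter}/offset/{offset}": PARAMETER_ROUTE_MODE,
--     "/menu/{mode}/{genre}/season/{season_filter}": PARAMETER_ROUTE_MODE,
--     "/menu/{mode}/{genre}/season/{season_filter}/offset/{offset}": PARAMETER_ROUTE_MODE,
--     "/series/{series_id}": "series",
--     "/series/{series_id}/{collection_id}": "episodes",
--     "/series/{series_id}/{collection_id}/offset/{offset}": "episodes",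
--     "/video/{series_id}/{episode_id}/{stream_id}": "videoplay"
-- }
--
-- def get_matching_routes_from_mode(searching_mode: str) -> list:
--     matches = [pattern for pattern, mode in routes.items() if mode == searching_mode]
--     if not matches:
--         matches = [pattern for pattern, mode in routes.items() if mode == PARAMETER_ROUTE_MODE]
--     return matches
-- ===== Notes on version B (the rewrite author's own statement) =====
-- stated objective: simpler
-- what changed: B drops the mode->patterns grouping dict entirely and filters the route table directly for the requested mode with a one-shot fallback filter for the parameter mode.
import Mathlib
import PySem

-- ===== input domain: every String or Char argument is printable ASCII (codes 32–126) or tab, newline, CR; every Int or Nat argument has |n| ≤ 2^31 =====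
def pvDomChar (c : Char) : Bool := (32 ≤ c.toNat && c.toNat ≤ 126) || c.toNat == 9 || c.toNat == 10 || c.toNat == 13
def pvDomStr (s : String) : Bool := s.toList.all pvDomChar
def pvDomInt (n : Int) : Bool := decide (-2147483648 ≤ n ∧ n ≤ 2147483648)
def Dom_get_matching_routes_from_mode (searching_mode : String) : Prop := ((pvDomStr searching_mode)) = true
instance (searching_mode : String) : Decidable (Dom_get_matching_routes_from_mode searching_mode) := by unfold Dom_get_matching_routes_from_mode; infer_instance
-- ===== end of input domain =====

-- B replaces A's build-a-mode->patterns-index-then-look-it-up with two direct filters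
-- of the route table (requested mode, then the parameter-mode fallback): simpler, no
-- intermediate dict.

-- the module-level 'routes' dict as an insertion-ordered association list (shared data)
def pvRoutesTable : List (String × String) :=
  [("/menu/{mode}", "__parameter"),
   ("/menu/{mode}/offset/{offset}", "__parameter"),
   ("/menu/{mode}/{genre}", "__parameter"),
   ("/menu/{mode}/{genre}/offset/{offset}", "__parameter"),
   ("/menu/{mode}/{genre}/category/{category_filter}", "__parameter"),
   ("/menu/{mode}/{genre}/category/{category_filter}/offset/{offset}", "__parameter"),
   ("/menu/{mode}/{genre}/season/{season_filter}", "__parameter"),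
   ("/menu/{mode}/{genre}/season/{season_filter}/offset/{offset}", "__parameter"),
   ("/series/{series_id}", "series"),
   ("/series/{series_id}/{collection_id}", "episodes"),
   ("/series/{series_id}/{collection_id}/offset/{offset}", "episodes"),
   ("/video/{series_id}/{episode_id}/{stream_id}", "videoplay")]

-- ===== PORT A =====
-- Python falsiness of routes_by_mode.get(k): None or [] are falsy
def pvFalsyGet (o : Option (List String)) : Bool := (o.getD []).isEmpty

def get_matching_routes_from_mode (searching_mode : String) : Option (List String) :=
  let routes_by_mode : PySem.Dict String (List String) :=
    pvRoutesTable.foldl (fun d pm =>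
      let d := if pvFalsyGet (d.get? pm.2) then d.insert pm.2 [] else d
      -- '.get(mode).append(pattern)' mutates the list stored under the key
      d.modify pm.2 [] (fun l => l ++ [pm.1])) PySem.Dict.empty
  if pvFalsyGet (routes_by_mode.get? searching_mode) then
    routes_by_mode.get? "__parameter"
  else
    routes_by_mode.get? searching_mode

-- ===== PORT B =====
def get_matching_routes_from_mode_alt (searching_mode : String) : Option (List String) :=
  let ms := (pvRoutesTable.filter (fun pm => pm.2 == searching_mode)).map (·.1)
  if ms.isEmpty then
    some ((pvRoutesTable.filter (fun pm => pm.2 == "__parameter")).map (·.1))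
  else
    some ms

-- ===== PRECONDITION & SPEC =====
def Spec_get_matching_routes_from_mode (searching_mode : String) (out : Option (List String)) : Prop := out = get_matching_routes_from_mode_alt searching_mode
instance (searching_mode : String) (out : Option (List String)) : Decidable (Spec_get_matching_routes_from_mode searching_mode out) := by unfold Spec_get_matching_routes_from_mode; infer_instance

-- ===== CLAIM (what is proved, stated in full; the proofs are below) =====
def Claim_equal_get_matching_routes_from_mode : Prop := ∀ (searching_mode : String), Dom_get_matching_routes_from_mode searching_mode → Spec_get_matching_routes_from_mode searching_mode (get_matching_routes_from_mode searching_mode)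

-- ===== LEMMAS AND PROOFS =====

-- A's grouping dict is a fixed literal (the route table is constant)
def pvRbm : PySem.Dict String (List String) :=
  PySem.Dict.mk
    [("__parameter",
      ["/menu/{mode}", "/menu/{mode}/offset/{offset}", "/menu/{mode}/{genre}",
       "/menu/{mode}/{genre}/offset/{offset}",
       "/menu/{mode}/{genre}/category/{category_filter}",
       "/menu/{mode}/{genre}/category/{category_filter}/offset/{offset}",
       "/menu/{mode}/{genre}/season/{season_filter}",
       "/menu/{mode}/{genre}/season/{season_filter}/offset/{offset}"]),
     ("series", ["/series/{series_id}"]),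
     ("episodes",
      ["/series/{series_id}/{collection_id}",
       "/series/{series_id}/{collection_id}/offset/{offset}"]),
     ("videoplay", ["/video/{series_id}/{episode_id}/{stream_id}"])]

theorem pv_rbm_eq :
    (pvRoutesTable.foldl (fun d pm =>
      let d := if pvFalsyGet (d.get? pm.2) then d.insert pm.2 [] else d
      d.modify pm.2 [] (fun l => l ++ [pm.1])) PySem.Dict.empty) = pvRbm := by
  decide

theorem pvA_eq (m : String) :
    get_matching_routes_from_mode m =
      (if pvFalsyGet (pvRbm.get? m) then pvRbm.get? "__parameter" else pvRbm.get? m) := by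
  simp only [get_matching_routes_from_mode, pv_rbm_eq]

-- ===== VERDICT (by name: the statement is the Claim_ definition above) =====
theorem get_matching_routes_from_mode_spec : Claim_equal_get_matching_routes_from_mode := by
  intro m _
  show get_matching_routes_from_mode m = get_matching_routes_from_mode_alt m
  rw [pvA_eq]
  by_cases h1 : m = "__parameter"
  · subst h1; decide
  by_cases h2 : m = "series"
  · subst h2; decide
  by_cases h3 : m = "episodes"
  · subst h3; decide
  by_cases h4 : m = "videoplay"
  · subst h4; decide
  -- unknown mode: A's lookup misses, B's filter is empty; both fall back
  have e1 : ("__parameter" == m) = false := beq_eq_false_iff_ne.mpr (Ne.symm h1)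
  have e2 : ("series" == m) = false := beq_eq_false_iff_ne.mpr (Ne.symm h2)
  have e3 : ("episodes" == m) = false := beq_eq_false_iff_ne.mpr (Ne.symm h3)
  have e4 : ("videoplay" == m) = false := beq_eq_false_iff_ne.mpr (Ne.symm h4)
  simp [get_matching_routes_from_mode_alt, pvRbm, pvRoutesTable, pvFalsyGet,
    PySem.Dict.get?_mk_cons, PySem.Dict.get?, e1, e2, e3, e4]
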